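-- pv_equiv track=rewrite | github.com/mrogo22/PRISM | src/pysubgroup extensions/array_target.py | is_negative_then_zero
-- ===== SOURCE A (Python) =====
-- def is_negative_then_zero(array):
--
--     seen_zero = False  # Tracks if we have encountered zeroes
--     for value in array:
--         if value < 0:
--             if seen_zero:
--                 return False  # Encountered a positive number after zeroes
--         elif value == 0:
--             seen_zero = True  # Start tracking zeroes
--         else:
--             return False  # Negative values are not allowed
--     # Ensure the array has at least one positive number and one zero
--     return seen_zero and array[0] < 0
-- ===== SOURCE B (Python) =====
-- def is_negative_then_zero(array):
--     i = 0
--     n = len(array)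
--     while i < n and array[i] < 0:
--         i += 1
--     if i == 0 or i == n:
--         return False
--     return all(v == 0 for v in array[i:])
-- ===== Notes on version B (the rewrite author's own statement) =====
-- stated objective: simpler
-- what changed: Replaces the seen_zero state machine (flag loop plus final seen_zero-and-first-element check) by counting the leading run of negatives and then checking the remaining suffix is all zeros.
import Mathlib
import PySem

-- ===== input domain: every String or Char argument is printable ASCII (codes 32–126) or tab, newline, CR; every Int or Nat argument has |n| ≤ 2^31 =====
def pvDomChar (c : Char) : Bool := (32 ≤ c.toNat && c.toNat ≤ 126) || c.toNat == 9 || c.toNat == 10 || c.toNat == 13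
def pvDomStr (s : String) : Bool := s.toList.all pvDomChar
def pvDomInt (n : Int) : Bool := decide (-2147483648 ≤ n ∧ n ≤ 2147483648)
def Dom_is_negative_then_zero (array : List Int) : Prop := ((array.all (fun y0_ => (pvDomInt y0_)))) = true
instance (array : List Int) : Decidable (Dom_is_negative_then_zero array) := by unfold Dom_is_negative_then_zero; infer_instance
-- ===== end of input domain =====

-- B replaces A's seen_zero state machine by counting the leading negative run and checking the suffix is all zeros (objective: simpler; same cost).
-- ===== PORT A =====
-- A: single-pass state machine with a seen_zero flag, final check seen_zero and array[0] < 0.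
def isnzLoop (array : List Int) : List Int → Bool → Bool
  | [], seen => seen && decide (((PySem.List.pyGet? array 0).getD 0) < 0)
  | v :: rest, seen =>
    if v < 0 then
      if seen then false else isnzLoop array rest seen
    else if v = 0 then isnzLoop array rest true
    else false

def is_negative_then_zero (array : List Int) : Bool := isnzLoop array array false

-- ===== PORT B =====
-- B: length of the leading run of negatives (the while loop of Source B)
def negPrefixLen : List Int → Nat
  | [] => 0
  | v :: rest => if v < 0 then negPrefixLen rest + 1 else 0

def is_negative_then_zero_alt (array : List Int) : Bool :=
  let i := negPrefixLen array
  if i = 0 ∨ i = array.length then false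
  else (array.drop i).all (fun v => v == 0)

-- ===== PRECONDITION & SPEC =====
def Spec_is_negative_then_zero (array : List Int) (out : Bool) : Prop := out = is_negative_then_zero_alt array
instance (array : List Int) (out : Bool) : Decidable (Spec_is_negative_then_zero array out) := by unfold Spec_is_negative_then_zero; infer_instance

-- ===== CLAIM (what is proved, stated in full; the proofs are below) =====
def Claim_equal_is_negative_then_zero : Prop := ∀ (array : List Int), Dom_is_negative_then_zero array → Spec_is_negative_then_zero array (is_negative_then_zero array)

-- ===== LEMMAS AND PROOFS =====

theorem isnzLoop_true (array : List Int) (l : List Int) :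
    isnzLoop array l true
      = (l.all (fun v => v == 0) && decide (((PySem.List.pyGet? array 0).getD 0) < 0)) := by
  induction l with
  | nil => simp [isnzLoop]
  | cons v rest ih =>
    by_cases hv : v < 0
    · have : ¬ v = 0 := by omega
      simp [isnzLoop, hv, this]
    · by_cases hz : v = 0
      · simp [isnzLoop, hz, ih]
      · have : ¬ (v == 0) = true := by simpa using hz
        simp [isnzLoop, hv, hz, this]

theorem isnzLoop_false (array : List Int) (l : List Int) :
    isnzLoop array l false
      = (if negPrefixLen l = l.length then false
         else (l.drop (negPrefixLen l)).all (fun v => v == 0)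
              && decide (((PySem.List.pyGet? array 0).getD 0) < 0)) := by
  induction l with
  | nil => simp [isnzLoop, negPrefixLen]
  | cons v rest ih =>
    by_cases hv : v < 0
    · simp [isnzLoop, hv, negPrefixLen, ih]
    · by_cases hz : v = 0
      · have hz' : (v == 0) = true := by simpa using hz
        simp [isnzLoop, hz, negPrefixLen, isnzLoop_true]
      · simp [isnzLoop, hv, hz, negPrefixLen]

theorem negPrefixLen_pos_iff (v : Int) (rest : List Int) :
    negPrefixLen (v :: rest) ≠ 0 ↔ v < 0 := by
  by_cases hv : v < 0 <;> simp [negPrefixLen, hv]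

-- ===== VERDICT (by name: the statement is the Claim_ definition above) =====
theorem is_negative_then_zero_spec : Claim_equal_is_negative_then_zero := by
  intro array _
  unfold Spec_is_negative_then_zero
  show isnzLoop array array false = _
  rw [isnzLoop_false]
  unfold is_negative_then_zero_alt
  cases array with
  | nil => simp [negPrefixLen]
  | cons v rest =>
    by_cases hlen : negPrefixLen (v :: rest) = (v :: rest).length
    · simp [hlen]
    · by_cases h0 : negPrefixLen (v :: rest) = 0
      · have hv : ¬ v < 0 := by
          have := (negPrefixLen_pos_iff v rest)
          tauto
        simp [h0, hv]
      · have hv : v < 0 := (negPrefixLen_pos_iff v rest).mp h0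
        simp [h0, hv]
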